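-- pv_equiv track=rewrite | github.com/kmedved/pbpstats | historic_backfill/intraperiod_missing_sub_repair.py | _deadball_choice_kind
-- ===== SOURCE A (Python) =====
-- from typing import Any, Dict, Iterable, List, Optional, Tuple
--
-- def _deadball_choice_kind(
--     anchors: List[Dict[str, Any]], chosen_anchor: Optional[Dict[str, Any]]
-- ) -> Optional[str]:
--     if not anchors or chosen_anchor is None:
--         return None
--     unique_anchor_indices = sorted({int(anchor["anchor_index"]) for anchor in anchors})
--     if len(unique_anchor_indices) == 1:
--         return "only_winning"
--     chosen_index = int(chosen_anchor["anchor_index"])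
--     if chosen_index == unique_anchor_indices[0]:
--         return "earliest_winning"
--     if chosen_index == unique_anchor_indices[-1]:
--         return "latest_winning"
--     return "middle_winning"
-- ===== SOURCE B (Python) =====
-- from typing import Any, Dict, List, Optional
--
--
-- def _classify(chosen: int, lo: int, hi: int) -> str:
--     if chosen == lo:
--         return "earliest_winning"
--     if chosen == hi:
--         return "latest_winning"
--     return "middle_winning"
--
--
-- def _deadball_choice_kind(
--     anchors: List[Dict[str, Any]], chosen_anchor: Optional[Dict[str, Any]]
-- ) -> Optional[str]:
--     if not anchors or chosen_anchor is None:
--         return None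
--     # no set, no sort: take min and max of the index list directly
--     indices = [int(a["anchor_index"]) for a in anchors]
--     lo = min(indices)
--     hi = max(indices)
--     if lo == hi:
--         return "only_winning"
--     return _classify(int(chosen_anchor["anchor_index"]), lo, hi)
-- ===== Notes on version B (the rewrite author's own statement) =====
-- stated objective: simpler
-- what changed: A deduplicates the anchor indices into a set, sorts it and compares the chosen index with the first and last sorted entries; B never builds a set or sorts: it maps the anchors to their index list, takes min() and max() of it, and classifies the chosen index against those two values in a small helper.
import Mathlib
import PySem

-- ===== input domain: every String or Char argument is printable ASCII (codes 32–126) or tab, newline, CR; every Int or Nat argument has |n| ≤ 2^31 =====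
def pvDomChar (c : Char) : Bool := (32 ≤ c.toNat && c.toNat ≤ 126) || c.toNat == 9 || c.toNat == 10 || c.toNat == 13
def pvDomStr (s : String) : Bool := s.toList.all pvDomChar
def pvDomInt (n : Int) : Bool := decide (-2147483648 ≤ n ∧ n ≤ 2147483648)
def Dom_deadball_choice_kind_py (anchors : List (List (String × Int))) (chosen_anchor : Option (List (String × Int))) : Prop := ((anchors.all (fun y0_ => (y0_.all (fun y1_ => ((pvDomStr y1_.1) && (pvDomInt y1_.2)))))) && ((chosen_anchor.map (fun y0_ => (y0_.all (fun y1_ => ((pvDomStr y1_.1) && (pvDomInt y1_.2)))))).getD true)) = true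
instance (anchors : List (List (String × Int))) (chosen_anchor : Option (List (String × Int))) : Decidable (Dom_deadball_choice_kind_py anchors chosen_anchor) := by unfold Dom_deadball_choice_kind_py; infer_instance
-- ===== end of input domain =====

-- B replaces A's build-a-set-then-sort classification by min()/max() over the
-- mapped index list plus a tiny classifier helper (objective: simpler).

-- anchor["anchor_index"] (first-match association-list lookup); total form, used
-- only under Pre_, which guarantees the key is present wherever Python reads it.
def pvAnchorIdx (a : List (String × Int)) : Int :=
  ((PySem.Dict.mk a).get? "anchor_index").getD 0

-- ===== PORT A =====
def deadball_choice_kind_py (anchors : List (List (String × Int))) (chosen_anchor : Option (List (String × Int))) : Option String :=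
  match anchors, chosen_anchor with
  | [], _ => none
  | _ :: _, none => none
  | _ :: _, some c =>
    -- unique_anchor_indices = sorted({int(anchor["anchor_index"]) for anchor in anchors})
    let unique := PySem.List.sorted (PySem.Set.ofList (anchors.map pvAnchorIdx)) (fun x => x) false
    if unique.length = 1 then some "only_winning"
    else
      let chosen_index := pvAnchorIdx c
      if chosen_index = PySem.List.pyGetD unique 0 0 then some "earliest_winning"
      else if chosen_index = PySem.List.pyGetD unique (-1) 0 then some "latest_winning"
      else some "middle_winning"

-- ===== PORT B =====
-- _classify(chosen, lo, hi)
def pvClassify (chosen lo hi : Int) : String :=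
  if chosen = lo then "earliest_winning"
  else if chosen = hi then "latest_winning"
  else "middle_winning"

-- Source B: indices = [int(a["anchor_index"]) for a in anchors]; lo = min(indices);
-- hi = max(indices).  min?/max? are none exactly on the empty list, which is the
-- 'not anchors' guard; the None guard on chosen_anchor is Option.bind.
def deadball_choice_kind_py_alt (anchors : List (List (String × Int))) (chosen_anchor : Option (List (String × Int))) : Option String :=
  chosen_anchor.bind (fun c =>
    let indices := anchors.map pvAnchorIdx
    match PySem.List.min? indices (fun y => y), PySem.List.max? indices (fun y => y) with
    | some lo, some hi =>
        if lo = hi then some "only_winning"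
        else some (pvClassify (pvAnchorIdx c) lo hi)
    | _, _ => none)

-- ===== PRECONDITION & SPEC =====
-- Pre_ excludes exactly the inputs on which Python A raises KeyError: past the
-- initial guard (anchors nonempty, chosen_anchor not None), some anchor lacks the
-- "anchor_index" key, or the chosen anchor lacks it while it is read (i.e. the
-- anchors carry at least two distinct index values).
def Pre_deadball_choice_kind_py (anchors : List (List (String × Int))) (chosen_anchor : Option (List (String × Int))) : Prop :=
  ∀ c, chosen_anchor = some c → anchors = [] ∨
    ((∀ a ∈ anchors, ((PySem.Dict.mk a).get? "anchor_index").isSome = true) ∧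
     ((∃ a ∈ anchors, ∃ b ∈ anchors, pvAnchorIdx a ≠ pvAnchorIdx b) →
      ((PySem.Dict.mk c).get? "anchor_index").isSome = true))
instance (anchors : List (List (String × Int))) (chosen_anchor : Option (List (String × Int))) : Decidable (Pre_deadball_choice_kind_py anchors chosen_anchor) := by unfold Pre_deadball_choice_kind_py; infer_instance

def pvWitness_deadball_choice_kind_py : (List (List (String × Int))) × (Option (List (String × Int))) :=
  ([[("anchor_index", 1)], [("anchor_index", 3)]], some [("anchor_index", 3)])

def Spec_deadball_choice_kind_py (anchors : List (List (String × Int))) (chosen_anchor : Option (List (String × Int))) (out : Option String) : Prop := out = deadball_choice_kind_py_alt anchors chosen_anchor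
instance (anchors : List (List (String × Int))) (chosen_anchor : Option (List (String × Int))) (out : Option String) : Decidable (Spec_deadball_choice_kind_py anchors chosen_anchor out) := by unfold Spec_deadball_choice_kind_py; infer_instance

-- ===== CLAIM (what is proved, stated in full; the proofs are below) =====
def Claim_equal_deadball_choice_kind_py : Prop := ∀ (anchors : List (List (String × Int))) (chosen_anchor : Option (List (String × Int))), Dom_deadball_choice_kind_py anchors chosen_anchor → Pre_deadball_choice_kind_py anchors chosen_anchor → Spec_deadball_choice_kind_py anchors chosen_anchor (deadball_choice_kind_py anchors chosen_anchor)

-- ===== LEMMAS AND PROOFS =====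

theorem pv_le_getLast (l : List Int) (h : l.Pairwise (· ≤ ·)) (y : Int) (hy : y ∈ l) (hn : l ≠ []) : y ≤ l.getLast hn := by
  induction l with
  | nil => simp at hy
  | cons a t ih =>
    obtain ⟨h1, h2⟩ := List.pairwise_cons.mp h
    rcases List.mem_cons.mp hy with rfl | hy
    · cases t with
      | nil => simp
      | cons b u =>
        rw [List.getLast_cons (by simp)]
        exact h1 _ (List.getLast_mem _)
    · rw [List.getLast_cons (by rintro rfl; simp at hy)]
      exact ih h2 hy _

-- sorted(set(x :: t)): head is min(x :: t), last is max(x :: t), and it is a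
-- singleton exactly when min = max (stated via the running folds).
theorem pv_sorted_set_facts (x : Int) (t : List Int) :
    PySem.List.pyGetD (PySem.List.sorted (PySem.Set.ofList (x :: t)) (fun y => y) false) 0 0
        = t.foldl min x ∧
    PySem.List.pyGetD (PySem.List.sorted (PySem.Set.ofList (x :: t)) (fun y => y) false) (-1) 0
        = t.foldl max x ∧
    ((PySem.List.sorted (PySem.Set.ofList (x :: t)) (fun y => y) false).length = 1
        ↔ t.foldl min x = t.foldl max x) := by
  set u := PySem.List.sorted (PySem.Set.ofList (x :: t)) (fun y => y) false with hu
  have hmemu : ∀ y : Int, y ∈ u ↔ y ∈ x :: t := by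
    intro y
    rw [hu, PySem.List.mem_sorted, PySem.Set.mem_ofList]
  have hlt : u.Pairwise (· < ·) := PySem.List.sorted_ofList_pairwise_lt (x :: t)
  have hle : u.Pairwise (· ≤ ·) := hlt.imp (fun h => le_of_lt h)
  have hnodup : u.Nodup := hlt.imp (fun h => ne_of_lt h)
  have hne : u ≠ [] := by
    intro h
    have := (hmemu x).mpr (by simp)
    rw [h] at this; simp at this
  have hminmem : t.foldl min x ∈ x :: t := by
    have := PySem.List.min?_id_cons x t
    exact PySem.List.min?_mem this
  have hminle : ∀ y ∈ x :: t, t.foldl min x ≤ y := by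
    intro y hy
    exact PySem.List.min?_isMin (PySem.List.min?_id_cons x t) y hy
  have hmaxmem : t.foldl max x ∈ x :: t := by
    have := PySem.List.max?_id_cons x t
    exact PySem.List.max?_mem this
  have hmaxge : ∀ y ∈ x :: t, y ≤ t.foldl max x := by
    intro y hy
    exact PySem.List.max?_isMax (PySem.List.max?_id_cons x t) y hy
  obtain ⟨z, w, hzw⟩ := List.exists_cons_of_ne_nil hne
  have hhead : PySem.List.pyGetD u 0 0 = t.foldl min x := by
    rw [hzw, PySem.List.pyGetD_zero_cons]
    have hz1 : z ∈ x :: t := (hmemu z).mp (by rw [hzw]; simp)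
    have hz2 : z ≤ t.foldl min x := by
      have hsz : PySem.List.sorted (PySem.Set.ofList (x :: t)) (fun y => y) false = z :: w := by
        rw [← hu]; exact hzw
      exact PySem.List.key_head_sorted_le _ _ hsz _ ((PySem.Set.mem_ofList _ _).mpr hminmem)
    exact le_antisymm hz2 (hminle z hz1)
  have hlast : PySem.List.pyGetD u (-1) 0 = t.foldl max x := by
    rw [PySem.List.pyGetD_neg_one u 0 hne]
    have h1 : u.getLast hne ∈ x :: t := (hmemu _).mp (List.getLast_mem hne)
    have h2 : t.foldl max x ≤ u.getLast hne :=
      pv_le_getLast u hle _ ((hmemu _).mpr hmaxmem) hne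
    exact le_antisymm (hmaxge _ h1) h2
  refine ⟨hhead, hlast, ?_, ?_⟩
  · intro hlen
    obtain ⟨m, hm⟩ := List.length_eq_one_iff.mp hlen
    have h1 : t.foldl min x = m := by
      have := (hmemu _).mpr hminmem
      rw [hm] at this; simpa using this
    have h2 : t.foldl max x = m := by
      have := (hmemu _).mpr hmaxmem
      rw [hm] at this; simpa using this
    rw [h1, h2]
  · intro heq
    have hall : ∀ y ∈ u, y = t.foldl min x := by
      intro y hy
      have := hminle y ((hmemu y).mp hy)
      have := hmaxge y ((hmemu y).mp hy)
      omega
    rw [hzw]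
    have hz : z = t.foldl min x := hall z (by rw [hzw]; simp)
    have hw : w = [] := by
      rw [List.eq_nil_iff_forall_not_mem]
      intro y hy
      have hyz : y = t.foldl min x := hall y (by rw [hzw]; simp [hy])
      have : z ∉ w := (List.nodup_cons.mp (hzw ▸ hnodup)).1
      exact this (hz ▸ hyz ▸ hy)
    rw [hw]; rfl

-- ===== VERDICT (by name: the statement is the Claim_ definition above) =====
theorem deadball_choice_kind_py_spec : Claim_equal_deadball_choice_kind_py := by
  intro anchors chosen_anchor _ _
  unfold Spec_deadball_choice_kind_py
  match anchors, chosen_anchor with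
  | [], none => rfl
  | [], some c => rfl
  | _ :: _, none => rfl
  | a0 :: rest, some c =>
    simp only [deadball_choice_kind_py, deadball_choice_kind_py_alt, Option.bind_some,
      List.map_cons, PySem.List.min?_id_cons, PySem.List.max?_id_cons]
    obtain ⟨hhead, hlast, hlen⟩ := pv_sorted_set_facts (pvAnchorIdx a0) (rest.map pvAnchorIdx)
    simp only [hhead, hlast, hlen, pvClassify]
    split_ifs <;> rfl
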